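-- pv_equiv track=rewrite | github.com/dayongkr/problem-solving | 백준/Silver/24495. Non－Transitive Dice/Non－Transitive Dice.py | result
-- ===== SOURCE A (Python) =====
-- def result(a, b):
--     x = 0
--     y = 0
--     for i in range(len(a)):
--         for j in range(len(b)):
--             if a[i] > b[j]:
--                 x += 1
--     for i in range(len(b)):
--         for j in range(len(a)):
--             if b[i] > a[j]:
--                 y += 1
--     return x > y
-- ===== SOURCE B (Python) =====
-- def result(a, b):
--     # Sort both lists once, then count "x beats y" pairs with a two-pointer sweep.
--     def beats(xs, ys):  # xs, ys ascending; number of pairs (x, y) with x > y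
--         i = 0
--         total = 0
--         for x in xs:
--             while i < len(ys) and ys[i] < x:
--                 i += 1
--             total += i
--         return total
--     sa = sorted(a)
--     sb = sorted(b)
--     return beats(sa, sb) > beats(sb, sa)
-- ===== Notes on version B (the rewrite author's own statement) =====
-- stated objective: faster
-- what changed: Replaces the two quadratic nested index loops with sorting both lists once and a two-pointer merge sweep that counts winning pairs.
import Mathlib
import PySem

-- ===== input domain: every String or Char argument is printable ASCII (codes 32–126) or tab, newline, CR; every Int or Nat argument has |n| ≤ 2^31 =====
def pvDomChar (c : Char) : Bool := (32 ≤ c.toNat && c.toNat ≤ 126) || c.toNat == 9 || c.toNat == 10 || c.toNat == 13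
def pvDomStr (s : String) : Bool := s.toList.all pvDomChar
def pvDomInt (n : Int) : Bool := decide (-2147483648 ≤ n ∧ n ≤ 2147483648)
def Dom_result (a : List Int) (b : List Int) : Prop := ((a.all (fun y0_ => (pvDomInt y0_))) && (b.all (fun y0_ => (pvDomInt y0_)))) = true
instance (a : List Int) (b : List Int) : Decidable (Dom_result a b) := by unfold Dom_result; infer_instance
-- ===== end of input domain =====

-- B sorts both lists once and counts winning pairs with a two-pointer sweep instead of A's two nested quadratic index loops (return value only; neither mutates its arguments).

-- ===== PORT A =====
def result (a : List Int) (b : List Int) : Bool :=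
  let x : Int := (PySem.List.pyRange 0 (a.length : Int) 1).foldl
    (fun x i => (PySem.List.pyRange 0 (b.length : Int) 1).foldl
      (fun x j => if PySem.List.pyGetD a i 0 > PySem.List.pyGetD b j 0 then x + 1 else x) x) 0
  let y : Int := (PySem.List.pyRange 0 (b.length : Int) 1).foldl
    (fun y i => (PySem.List.pyRange 0 (a.length : Int) 1).foldl
      (fun y j => if PySem.List.pyGetD b i 0 > PySem.List.pyGetD a j 0 then y + 1 else y) y) 0
  decide (x > y)

-- ===== PORT B =====
-- the inner 'while i < len(ys) and ys[i] < x: i += 1' of Source B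
def pvAdvance (ys : List Int) (x : Int) (i : Nat) : Nat :=
  if h : i < ys.length then
    if ys[i] < x then pvAdvance ys x (i + 1) else i
  else i
termination_by ys.length - i

-- beats(xs, ys) of Source B: fold over xs carrying the pointer i and the running total
def pvBeats (xs ys : List Int) : Int :=
  (xs.foldl (fun (st : Nat × Int) x =>
    let i := pvAdvance ys x st.1
    (i, st.2 + (i : Int))) (0, 0)).2

def result_alt (a : List Int) (b : List Int) : Bool :=
  let sa := PySem.List.sorted a (fun v => v) false
  let sb := PySem.List.sorted b (fun v => v) false
  decide (pvBeats sa sb > pvBeats sb sa)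

-- ===== PRECONDITION & SPEC =====
def Spec_result (a : List Int) (b : List Int) (out : Bool) : Prop := out = result_alt a b
instance (a : List Int) (b : List Int) (out : Bool) : Decidable (Spec_result a b out) := by unfold Spec_result; infer_instance

-- ===== CLAIM (what is proved, stated in full; the proofs are below) =====
def Claim_equal_result : Prop := ∀ (a : List Int) (b : List Int), Dom_result a b → Spec_result a b (result a b)

-- ===== LEMMAS AND PROOFS =====

-- the common value both programs compute: Σ_{u ∈ a} #{v ∈ b | v < u}
def pvWins (a b : List Int) : Int :=
  (a.map (fun u => ((b.countP (fun v => decide (v < u)) : Nat) : Int))).sum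

-- A's nested index loops compute pvWins
lemma pvA_loop (a b : List Int) :
    (PySem.List.pyRange 0 (a.length : Int) 1).foldl
      (fun x i => (PySem.List.pyRange 0 (b.length : Int) 1).foldl
        (fun x j => if PySem.List.pyGetD a i 0 > PySem.List.pyGetD b j 0 then x + 1 else x) x) 0
    = pvWins a b := by
  unfold pvWins
  rw [PySem.List.foldl_pyRange_zero_pyGetD' a 0
    (fun x u => (PySem.List.pyRange 0 (b.length : Int) 1).foldl
      (fun x j => if u > PySem.List.pyGetD b j 0 then x + 1 else x) x) 0]
  have h : ∀ (u : Int) (x : Int),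
      (PySem.List.pyRange 0 (b.length : Int) 1).foldl
        (fun x j => if u > PySem.List.pyGetD b j 0 then x + 1 else x) x
      = x + (b.countP (fun v => decide (v < u)) : Int) := by
    intro u x
    rw [PySem.List.foldl_pyRange_zero_pyGetD' b 0
      (fun x v => if u > v then x + 1 else x) x]
    have := PySem.List.foldl_count_if (fun v => decide (v < u)) b x
    simpa using this
  simp only [h]
  rw [PySem.List.foldl_add a (fun u => (b.countP (fun v => decide (v < u)) : Int)) 0]
  simp

-- on a sorted list, position i holds an element < x exactly while i < countP (· < x)
lemma pvSorted_index_lt (ys : List Int) (hys : ys.Pairwise (· ≤ ·)) (x : Int) :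
    ∀ i (h : i < ys.length), (ys[i] < x ↔ i < ys.countP (fun v => decide (v < x))) := by
  induction ys with
  | nil => intro i h; simp at h
  | cons y ys ih =>
    intro i h
    rcases List.pairwise_cons.mp hys with ⟨hy, htl⟩
    rcases i with _ | i
    · simp only [List.getElem_cons_zero, List.countP_cons]
      constructor
      · intro hlt
        have : decide (y < x) = true := by simpa using hlt
        simp [this]
      · intro hlt
        by_contra hnot
        have h0 : List.countP (fun v => decide (v < x)) ys = 0 :=
          List.countP_eq_zero.mpr (fun v hv => by simp; exact le_trans (not_lt.mp hnot) (hy v hv))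
        simp [h0, show ¬ y < x from hnot] at hlt
    · simp only [List.getElem_cons_succ, List.countP_cons]
      have h' : i < ys.length := by simpa using h
      by_cases hyx : y < x
      · rw [ih htl i h']
        simp [hyx]
      · have h0 : List.countP (fun v => decide (v < x)) ys = 0 :=
          List.countP_eq_zero.mpr (fun v hv => by simp; exact le_trans (not_lt.mp hyx) (hy v hv))
        have : ¬ ys[i] < x := by
          have := List.countP_eq_zero.mp h0 ys[i] (List.getElem_mem h')
          simpa using this
        simp [h0, hyx, this]

-- the while loop stops exactly at countP (· < x), as long as it starts at or before it
lemma pvAdvance_eq (ys : List Int) (hys : ys.Pairwise (· ≤ ·)) (x : Int) :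
    ∀ i, i ≤ ys.countP (fun v => decide (v < x)) →
      pvAdvance ys x i = ys.countP (fun v => decide (v < x)) := by
  intro i hi
  set c := ys.countP (fun v => decide (v < x)) with hc
  have hlen : c ≤ ys.length := hc ▸ List.countP_le_length
  induction hn : c - i generalizing i with
  | zero =>
    have hic : i = c := by omega
    rw [pvAdvance]
    split_ifs with h1 h2
    · exfalso; exact absurd ((pvSorted_index_lt ys hys x i h1).mp h2) (by omega)
    · exact hic
    · exact hic
  | succ n ihn =>
    have hic : i < c := by omega
    have hil : i < ys.length := by omega
    rw [pvAdvance]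
    rw [dif_pos hil, if_pos ((pvSorted_index_lt ys hys x i hil).mpr hic)]
    exact ihn (i+1) (by omega) (by omega)

-- invariant of B's fold: the pointer never overshoots, and the total is the running sum of counts
lemma pvBeats_loop (ys : List Int) (hys : ys.Pairwise (· ≤ ·)) :
    ∀ (xs : List Int), xs.Pairwise (· ≤ ·) → ∀ (i : Nat) (t : Int),
      (∀ x ∈ xs, i ≤ ys.countP (fun v => decide (v < x))) →
      (xs.foldl (fun (st : Nat × Int) x =>
        let k := pvAdvance ys x st.1
        (k, st.2 + (k : Int))) (i, t)).2
      = t + (xs.map (fun u => ((ys.countP (fun v => decide (v < u)) : Nat) : Int))).sum := by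
  intro xs
  induction xs with
  | nil => intro _ i t _; simp
  | cons x xs ih =>
    intro hxs i t hle
    rcases List.pairwise_cons.mp hxs with ⟨hx, htl⟩
    have hadv : pvAdvance ys x i = ys.countP (fun v => decide (v < x)) :=
      pvAdvance_eq ys hys x i (hle x (List.mem_cons_self))
    simp only [List.foldl_cons, List.map_cons, List.sum_cons, hadv]
    rw [ih htl _ _ (fun x' hx' => by
      exact List.countP_mono_left (fun v _ hv => by
        simp at hv ⊢; exact lt_of_lt_of_le hv (hx x' hx')))]
    ring

-- B's beats on the two sorted copies computes pvWins of the original lists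
lemma pvBeats_eq (a b : List Int) :
    pvBeats (PySem.List.sorted a (fun v => v) false) (PySem.List.sorted b (fun v => v) false)
      = pvWins a b := by
  unfold pvBeats pvWins
  have hsb : (PySem.List.sorted b (fun v => v) false).Pairwise (· ≤ ·) :=
    PySem.List.sorted_pairwise b (fun v => v)
  have hsa : (PySem.List.sorted a (fun v => v) false).Pairwise (· ≤ ·) :=
    PySem.List.sorted_pairwise a (fun v => v)
  rw [pvBeats_loop _ hsb _ hsa 0 0 (fun _ _ => Nat.zero_le _)]
  have hpa := PySem.List.sorted_perm a (fun v => v) false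
  have hpb := PySem.List.sorted_perm b (fun v => v) false
  have hmap : ∀ u, ((PySem.List.sorted b (fun v => v) false).countP (fun v => decide (v < u)))
      = b.countP (fun v => decide (v < u)) := fun u => hpb.countP_eq _
  simp only [hmap]
  rw [(hpa.map (fun u => ((b.countP (fun v => decide (v < u)) : Nat) : Int))).sum_eq]
  simp

-- ===== VERDICT (by name: the statement is the Claim_ definition above) =====
theorem result_spec : Claim_equal_result := by
  intro a b _
  unfold Spec_result result result_alt
  simp only [pvA_loop, pvBeats_eq]
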